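-- pv_equiv track=rewrite | github.com/cs-cordero/advent-of-code | advent_of_code/2018/day11/day11.py | get_grid_sums
-- ===== SOURCE A (Python) =====
-- def get_grid_sums(grid, topleft):
--     px, py = topleft
--     assert px <= 298
--     assert py <= 298
--     px -= 1
--     py -= 1
--
--     mapping = {}
--     points_in_grid = [(px + x, py + y) for x in range(3) for y in range(3)]
--     current_sum = sum(grid[y][x] for x, y in points_in_grid)
--     mapping[3] = current_sum
--
--     for i in range(3, 300):
--         rgt_edge = [(px + x, py + i) for x in range(i + 1)]
--         btm_edge = [(px + i, py + y) for y in range(i + 1)][:-1]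
--         next_edge = rgt_edge + btm_edge
--
--         try:
--             current_sum += sum(grid[y][x] for x, y in next_edge)
--         except IndexError:
--             break
--         mapping[i + 1] = current_sum
--     return mapping
-- ===== SOURCE B (Python) =====
-- def get_grid_sums(grid, topleft):
--     px, py = topleft
--     assert px <= 298
--     assert py <= 298
--     px -= 1
--     py -= 1
--
--     mapping = {3: sum(grid[py + y][px + x] for y in range(3) for x in range(3))}
--     for size in range(4, 301):
--         try:
--             mapping[size] = sum(grid[py + y][px + x]
--                                 for y in range(size) for x in range(size))
--         except IndexError:
--             break
--     return mapping
-- ===== Notes on version B (the rewrite author's own statement) =====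
-- stated objective: simpler
-- what changed: Replaces the incremental edge-accumulation (initial 3x3 plus an L-shaped edge added per size) with a direct full recomputation of each square's sum inside one try/except loop over sizes 3..300.
import Mathlib
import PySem

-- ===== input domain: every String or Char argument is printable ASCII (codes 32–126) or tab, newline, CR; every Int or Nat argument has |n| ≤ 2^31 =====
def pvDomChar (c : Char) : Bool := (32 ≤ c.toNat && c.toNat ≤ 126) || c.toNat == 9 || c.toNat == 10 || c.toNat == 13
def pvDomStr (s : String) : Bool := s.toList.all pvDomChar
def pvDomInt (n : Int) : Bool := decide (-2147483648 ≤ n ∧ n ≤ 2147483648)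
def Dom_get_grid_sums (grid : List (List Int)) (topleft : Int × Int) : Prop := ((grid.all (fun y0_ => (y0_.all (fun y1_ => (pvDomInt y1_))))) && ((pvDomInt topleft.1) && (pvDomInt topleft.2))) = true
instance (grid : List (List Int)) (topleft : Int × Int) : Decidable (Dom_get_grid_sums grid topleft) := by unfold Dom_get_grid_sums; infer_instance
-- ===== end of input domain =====

-- B replaces A's incremental edge accumulation by a direct full recomputation of every
-- square sum (simpler, not faster); equivalence is proved on Pre_ (= exactly where A returns).

-- ===== PORT A =====
-- shared helper: grid[y][x] with Python's negative-index wraparound; none = IndexError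
def pvCell (grid : List (List Int)) (x y : Int) : Option Int :=
  (PySem.List.pyGet? grid y).bind (fun row => PySem.List.pyGet? row x)

-- shared helper: sum(grid[y][x] for x, y in pts); none if any read raises IndexError
def pvSumCells (grid : List (List Int)) (pts : List (Int × Int)) : Option Int :=
  pts.foldl (fun acc p => acc.bind (fun s => (pvCell grid p.1 p.2).map (fun v => s + v))) (some 0)

def get_grid_sums (grid : List (List Int)) (topleft : Int × Int) : List (Int × Int) :=
  if 298 < topleft.1 || 298 < topleft.2 then [] else   -- assert fails: outside Pre_, value arbitrary
  let px := topleft.1 - 1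
  let py := topleft.2 - 1
  let points_in_grid := (PySem.List.pyRange 0 3 1).flatMap
      (fun x => (PySem.List.pyRange 0 3 1).map (fun y => (px + x, py + y)))
  match pvSumCells grid points_in_grid with
  | none => []                                          -- uncaught IndexError: outside Pre_
  | some s0 =>
    ((PySem.List.pyRange 3 300 1).foldl (fun st i =>
        if st.2.2 then st else                          -- loop left by break
        match pvSumCells grid
            (((PySem.List.pyRange 0 (i + 1) 1).map (fun x => (px + x, py + i))) ++
             (((PySem.List.pyRange 0 (i + 1) 1).map (fun y => (px + i, py + y))).dropLast)) with
        | none => (st.1, st.2.1, true)                  -- except IndexError: break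
        | some e => (st.1 ++ [(i + 1, st.2.1 + e)], st.2.1 + e, false))
      ([(3, s0)], s0, false)).1

-- ===== PORT B =====
def get_grid_sums_alt (grid : List (List Int)) (topleft : Int × Int) : List (Int × Int) :=
  if 298 < topleft.1 || 298 < topleft.2 then [] else   -- assert fails: outside Pre_, value arbitrary
  let px := topleft.1 - 1
  let py := topleft.2 - 1
  match pvSumCells grid ((PySem.List.pyRange 0 3 1).flatMap
      (fun y => (PySem.List.pyRange 0 3 1).map (fun x => (px + x, py + y)))) with
  | none => []                                          -- uncaught IndexError: outside Pre_
  | some s0 =>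
    ((PySem.List.pyRange 4 301 1).foldl (fun st size =>
        if st.2 then st else                            -- loop left by break
        match pvSumCells grid ((PySem.List.pyRange 0 size 1).flatMap
            (fun y => (PySem.List.pyRange 0 size 1).map (fun x => (px + x, py + y)))) with
        | none => (st.1, true)                          -- except IndexError: break
        | some v => (st.1 ++ [(size, v)], false))
      ([(3, s0)], false)).1

-- ===== PRECONDITION & SPEC =====
-- Pre_ holds exactly where A returns: both asserts pass and every cell of the initial
-- 3x3 window (read outside A's try) is readable; everywhere else A raises.
def Pre_get_grid_sums (grid : List (List Int)) (topleft : Int × Int) : Prop :=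
  topleft.1 ≤ 298 ∧ topleft.2 ≤ 298 ∧
  ∀ x ∈ ([0, 1, 2] : List Int), ∀ y ∈ ([0, 1, 2] : List Int),
    (pvCell grid (topleft.1 - 1 + x) (topleft.2 - 1 + y)).isSome = true
instance (grid : List (List Int)) (topleft : Int × Int) : Decidable (Pre_get_grid_sums grid topleft) := by unfold Pre_get_grid_sums; infer_instance
def pvWitness_get_grid_sums : List (List Int) × (Int × Int) :=
  ([[1, 1, 1], [1, 1, 1], [1, 1, 1]], (1, 1))

def Spec_get_grid_sums (grid : List (List Int)) (topleft : Int × Int) (out : List (Int × Int)) : Prop := out = get_grid_sums_alt grid topleft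
instance (grid : List (List Int)) (topleft : Int × Int) (out : List (Int × Int)) : Decidable (Spec_get_grid_sums grid topleft out) := by unfold Spec_get_grid_sums; infer_instance

-- ===== CLAIM (what is proved, stated in full; the proofs are below) =====
def Claim_equal_get_grid_sums : Prop := ∀ (grid : List (List Int)) (topleft : Int × Int), Dom_get_grid_sums grid topleft → Pre_get_grid_sums grid topleft → Spec_get_grid_sums grid topleft (get_grid_sums grid topleft)

-- ===== LEMMAS AND PROOFS =====

-- cell value with default 0 (only meaningful where the cell is readable)
def pvCv (grid : List (List Int)) (x y : Int) : Int := (pvCell grid x y).getD 0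

-- the square of size n is fully readable
abbrev pvSqOk (grid : List (List Int)) (px py : Int) (n : Nat) : Prop :=
  ∀ y < n, ∀ x < n, (pvCell grid (px + x) (py + y)).isSome = true

-- sum of the square of size n (row-major)
def pvSqSum (grid : List (List Int)) (px py : Int) (n : Nat) : Int :=
  ((List.range n).map (fun y : Nat =>
    ((List.range n).map (fun x : Nat => pvCv grid (px + x) (py + y))).sum)).sum

theorem pvSumFlatMap {α : Type} (l : List α) (f : α → List Int) :
    (l.flatMap f).sum = (l.map (fun a => (f a).sum)).sum := by
  induction l with
  | nil => rfl
  | cons a rest ih => simp [List.flatMap_cons, List.sum_append, ih]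

theorem pvSumCells_none (grid : List (List Int)) (pts : List (Int × Int)) :
    pts.foldl (fun acc p => acc.bind (fun s => (pvCell grid p.1 p.2).map (fun v => s + v)))
      (none : Option Int) = none := by
  induction pts with
  | nil => rfl
  | cons p rest ih => simpa using ih

theorem pvSumCells_char (grid : List (List Int)) (pts : List (Int × Int)) :
    pvSumCells grid pts =
      if ∀ p ∈ pts, (pvCell grid p.1 p.2).isSome = true then
        some ((pts.map (fun p => pvCv grid p.1 p.2)).sum)
      else none := by
  suffices h : ∀ (pts : List (Int × Int)) (a : Int),
      pts.foldl (fun acc p => acc.bind (fun s => (pvCell grid p.1 p.2).map (fun v => s + v)))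
        (some a) =
      if ∀ p ∈ pts, (pvCell grid p.1 p.2).isSome = true then
        some (a + (pts.map (fun p => pvCv grid p.1 p.2)).sum)
      else none by
    simpa using h pts 0
  intro pts
  induction pts with
  | nil => intro a; simp
  | cons p rest ih =>
    intro a
    rcases hc : pvCell grid p.1 p.2 with _ | v
    · simp only [List.foldl_cons, hc, Option.map_none, Option.bind_some, pvSumCells_none]
      rw [if_neg]
      intro hall
      have := hall p (by simp)
      rw [hc] at this; simp at this
    · simp only [List.foldl_cons, hc, Option.map_some, Option.bind_some, ih]
      by_cases hall : ∀ q ∈ rest, (pvCell grid q.1 q.2).isSome = true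
      · rw [if_pos hall, if_pos]
        · simp [pvCv, hc]; ring_nf
        · intro q hq
          rcases List.mem_cons.mp hq with rfl | hq'
          · simp [hc]
          · exact hall q hq'
      · rw [if_neg hall, if_neg]
        intro h
        exact hall (fun q hq => h q (List.mem_cons_of_mem p hq))

-- B's point list for a square of (nonneg) integer size
theorem pvSq_char (grid : List (List Int)) (px py : Int) (n : Nat) :
    pvSumCells grid ((PySem.List.pyRange 0 (n : Int) 1).flatMap
        (fun y => (PySem.List.pyRange 0 (n : Int) 1).map (fun x => (px + x, py + y)))) =
      if pvSqOk grid px py n then some (pvSqSum grid px py n) else none := by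
  have hzadd : (fun k : Nat => (0 : Int) + (k : Int)) = (fun k : Nat => (k : Int)) := by
    funext k; ring
  have hrange : PySem.List.pyRange 0 (n : Int) 1 = (List.range n).map (fun k : Nat => (k : Int)) := by
    rw [PySem.List.pyRange_one, show ((n : Int) - 0).toNat = n by omega, hzadd]
  have hpts : ((PySem.List.pyRange 0 (n : Int) 1).flatMap
      (fun y => (PySem.List.pyRange 0 (n : Int) 1).map (fun x => (px + x, py + y)))) =
      (List.range n).flatMap (fun y : Nat => (List.range n).map
        (fun x : Nat => (px + (x : Int), py + (y : Int)))) := by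
    rw [hrange, List.flatMap_map]
    simp only [List.map_map]
    rfl
  rw [hpts, pvSumCells_char]
  congr 1
  · simp only [eq_iff_iff]
    constructor
    · intro h y hy x hx
      exact h _ (by
        simp only [List.mem_flatMap, List.mem_map, List.mem_range]
        exact ⟨y, hy, x, hx, rfl⟩)
    · intro h p hp
      simp only [List.mem_flatMap, List.mem_map, List.mem_range] at hp
      obtain ⟨y, hy, x, hx, rfl⟩ := hp
      exact h y hy x hx
  · unfold pvSqSum
    rw [List.map_flatMap]
    simp only [List.map_map]
    rw [pvSumFlatMap]
    rfl

theorem pvSq_char' (grid : List (List Int)) (px py : Int) (s : Int) (hs : 0 ≤ s) :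
    pvSumCells grid ((PySem.List.pyRange 0 s 1).flatMap
        (fun y => (PySem.List.pyRange 0 s 1).map (fun x => (px + x, py + y)))) =
      if pvSqOk grid px py s.toNat then some (pvSqSum grid px py s.toNat) else none := by
  obtain ⟨n, rfl⟩ := Int.eq_ofNat_of_zero_le hs
  simpa using pvSq_char grid px py n

-- A's L-shaped edge for i = ↑n
theorem pvEdge_char (grid : List (List Int)) (px py : Int) (n : Nat) :
    pvSumCells grid
      (((PySem.List.pyRange 0 ((n : Int) + 1) 1).map (fun x => (px + x, py + (n : Int)))) ++
       (((PySem.List.pyRange 0 ((n : Int) + 1) 1).map (fun y => (px + (n : Int), py + y))).dropLast)) =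
      if (∀ x < n + 1, (pvCell grid (px + x) (py + n)).isSome = true) ∧
         (∀ y < n, (pvCell grid (px + n) (py + y)).isSome = true) then
        some (((List.range (n + 1)).map (fun x : Nat => pvCv grid (px + x) (py + n))).sum +
              ((List.range n).map (fun y : Nat => pvCv grid (px + n) (py + y))).sum)
      else none := by
  have hzadd : (fun k : Nat => (0 : Int) + (k : Int)) = (fun k : Nat => (k : Int)) := by
    funext k; ring
  have hrange : PySem.List.pyRange 0 ((n : Int) + 1) 1
      = (List.range (n + 1)).map (fun k : Nat => (k : Int)) := by
    rw [PySem.List.pyRange_one, show ((n : Int) + 1 - 0).toNat = n + 1 by omega, hzadd]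
  have hrgt : ((PySem.List.pyRange 0 ((n : Int) + 1) 1).map (fun x => (px + x, py + (n : Int))))
      = (List.range (n + 1)).map (fun x : Nat => (px + (x : Int), py + (n : Int))) := by
    rw [hrange, List.map_map]; rfl
  have hbtm : (((PySem.List.pyRange 0 ((n : Int) + 1) 1).map (fun y => (px + (n : Int), py + y))).dropLast)
      = (List.range n).map (fun y : Nat => (px + (n : Int), py + (y : Int))) := by
    rw [hrange, List.map_map, List.range_succ, List.map_append]
    simp only [List.map_cons, List.map_nil, List.dropLast_concat]
    rfl
  rw [hrgt, hbtm, pvSumCells_char]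
  congr 1
  · simp only [eq_iff_iff]
    constructor
    · intro h
      refine ⟨fun x hx => ?_, fun y hy => ?_⟩
      · exact h _ (by
          simp only [List.mem_append, List.mem_map, List.mem_range]
          exact Or.inl ⟨x, hx, rfl⟩)
      · exact h _ (by
          simp only [List.mem_append, List.mem_map, List.mem_range]
          exact Or.inr ⟨y, hy, rfl⟩)
    · rintro ⟨h1, h2⟩ p hp
      simp only [List.mem_append, List.mem_map, List.mem_range] at hp
      rcases hp with ⟨x, hx, rfl⟩ | ⟨y, hy, rfl⟩
      · exact h1 x hx
      · exact h2 y hy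
  · rw [List.map_append, List.sum_append]
    simp only [List.map_map]
    rfl

-- square readability grows exactly by the edge
theorem pvSqOk_succ (grid : List (List Int)) (px py : Int) (n : Nat) :
    pvSqOk grid px py (n + 1) ↔
      pvSqOk grid px py n ∧
      ((∀ x < n + 1, (pvCell grid (px + x) (py + n)).isSome = true) ∧
       (∀ y < n, (pvCell grid (px + n) (py + y)).isSome = true)) := by
  constructor
  · intro h
    exact ⟨fun y hy x hx => h y (by omega) x (by omega),
           fun x hx => h n (by omega) x hx,
           fun y hy => h y (by omega) n (by omega)⟩
  · rintro ⟨hsq, hb, hr⟩ y hy x hx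
    rcases Nat.lt_succ_iff_lt_or_eq.mp hy with hy' | rfl
    · rcases Nat.lt_succ_iff_lt_or_eq.mp hx with hx' | rfl
      · exact hsq y hy' x hx'
      · exact hr y hy'
    · exact hb x hx

-- square sum grows exactly by the edge sum
theorem pvSqSum_succ (grid : List (List Int)) (px py : Int) (n : Nat) :
    pvSqSum grid px py (n + 1) =
      pvSqSum grid px py n +
      (((List.range (n + 1)).map (fun x : Nat => pvCv grid (px + x) (py + n))).sum +
       ((List.range n).map (fun y : Nat => pvCv grid (px + n) (py + y))).sum) := by
  unfold pvSqSum
  have hrow : ∀ y : Nat,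
      ((List.range (n + 1)).map (fun x : Nat => pvCv grid (px + x) (py + y))).sum =
      ((List.range n).map (fun x : Nat => pvCv grid (px + x) (py + y))).sum + pvCv grid (px + n) (py + y) := by
    intro y; rw [List.range_succ]; simp
  simp only [hrow]
  rw [List.range_succ, List.map_append, List.sum_append, PySem.List.sum_map_add_int]
  simp only [List.map_cons, List.map_nil, List.sum_cons, List.sum_nil]
  ring

-- B's fold stays put once broken
theorem pvFoldB_broken (grid : List (List Int)) (px py : Int) (l : List Int) (m : List (Int × Int)) :
    (l.foldl (fun st size =>
      if st.2 then st else
      match pvSumCells grid ((PySem.List.pyRange 0 size 1).flatMap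
          (fun y => (PySem.List.pyRange 0 size 1).map (fun x => (px + x, py + y)))) with
      | none => (st.1, true)
      | some v => (st.1 ++ [(size, v)], false)) (m, true)) = (m, true) := by
  induction l with
  | nil => rfl
  | cons s rest ih => simpa using ih

-- A's fold stays put once broken
theorem pvFoldA_broken (grid : List (List Int)) (px py : Int) (l : List Int)
    (m : List (Int × Int)) (c : Int) :
    (l.foldl (fun st i =>
      if st.2.2 then st else
      match pvSumCells grid
          (((PySem.List.pyRange 0 (i + 1) 1).map (fun x => (px + x, py + i))) ++
           (((PySem.List.pyRange 0 (i + 1) 1).map (fun y => (px + i, py + y))).dropLast)) with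
      | none => (st.1, st.2.1, true)
      | some e => (st.1 ++ [(i + 1, st.2.1 + e)], st.2.1 + e, false)) (m, c, true)) = (m, c, true) := by
  induction l with
  | nil => rfl
  | cons i rest ih => simpa using ih

-- the main loop correspondence: A over [n, 300) from an unbroken state holding the sum of
-- the size-n square equals B over [n+1, 301)
theorem pvLoop (grid : List (List Int)) (px py : Int) :
    ∀ (k n : Nat), n + k = 300 → 3 ≤ n → pvSqOk grid px py n →
    ∀ (m : List (Int × Int)),
    ((PySem.List.pyRange (n : Int) 300 1).foldl (fun st i =>
      if st.2.2 then st else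
      match pvSumCells grid
          (((PySem.List.pyRange 0 (i + 1) 1).map (fun x => (px + x, py + i))) ++
           (((PySem.List.pyRange 0 (i + 1) 1).map (fun y => (px + i, py + y))).dropLast)) with
      | none => (st.1, st.2.1, true)
      | some e => (st.1 ++ [(i + 1, st.2.1 + e)], st.2.1 + e, false))
      (m, pvSqSum grid px py n, false)).1 =
    ((PySem.List.pyRange ((n : Int) + 1) 301 1).foldl (fun st size =>
      if st.2 then st else
      match pvSumCells grid ((PySem.List.pyRange 0 size 1).flatMap
          (fun y => (PySem.List.pyRange 0 size 1).map (fun x => (px + x, py + y)))) with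
      | none => (st.1, true)
      | some v => (st.1 ++ [(size, v)], false)) (m, false)).1 := by
  intro k
  induction k with
  | zero =>
    intro n hk h3 hok m
    have hn : n = 300 := by omega
    subst hn
    rw [PySem.List.pyRange_one_eq_nil (by norm_num),
        PySem.List.pyRange_one_eq_nil (by norm_num)]
    rfl
  | succ k ih =>
    intro n hk h3 hok m
    have hlt : (n : Int) < 300 := by exact_mod_cast (by omega : n < 300)
    rw [PySem.List.pyRange_one_cons hlt,
        PySem.List.pyRange_one_cons (by omega : (n : Int) + 1 < 301)]
    simp only [List.foldl_cons]
    simp only [Bool.false_eq_true, if_false]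
    have htn : ((n : Int) + 1).toNat = n + 1 := by omega
    rw [pvEdge_char grid px py n, pvSq_char' grid px py ((n : Int) + 1) (by omega), htn]
    by_cases hok' : pvSqOk grid px py (n + 1)
    · have hedge := (pvSqOk_succ grid px py n).mp hok'
      rw [if_pos hedge.2, if_pos hok']
      have hval : pvSqSum grid px py n +
          (((List.range (n + 1)).map (fun x : Nat => pvCv grid (px + x) (py + n))).sum +
           ((List.range n).map (fun y : Nat => pvCv grid (px + n) (py + y))).sum) =
          pvSqSum grid px py (n + 1) := (pvSqSum_succ grid px py n).symm
      dsimp only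
      rw [hval]
      exact ih (n + 1) (by omega) (by omega) hok'
        (m ++ [((n : Int) + 1, pvSqSum grid px py (n + 1))])
    · have hedge : ¬ ((∀ x < n + 1, (pvCell grid (px + x) (py + n)).isSome = true) ∧
          (∀ y < n, (pvCell grid (px + n) (py + y)).isSome = true)) := by
        intro he
        exact hok' ((pvSqOk_succ grid px py n).mpr ⟨hok, he⟩)
      rw [if_neg hedge, if_neg hok']
      show (List.foldl _ (m, pvSqSum grid px py n, true) _).1 = (List.foldl _ (m, true) _).1
      rw [pvFoldA_broken, pvFoldB_broken]

-- the initial 3x3 sum A computes (column-major) equals the row-major square sum of size 3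
theorem pvInit_char (grid : List (List Int)) (px py : Int) (hok : pvSqOk grid px py 3) :
    pvSumCells grid ((PySem.List.pyRange 0 3 1).flatMap
        (fun x => (PySem.List.pyRange 0 3 1).map (fun y => (px + x, py + y)))) =
      some (pvSqSum grid px py 3) := by
  have hr : PySem.List.pyRange 0 3 1 = [0, 1, 2] := by decide
  rw [hr, pvSumCells_char, if_pos]
  · congr 1
    simp [pvSqSum, List.range_succ]
    ring
  · intro p hp
    have g : ∀ (a b : Nat), a < 3 → b < 3 →
        (pvCell grid (px + (a : Int)) (py + (b : Int))).isSome = true :=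
      fun a b ha hb => hok b hb a ha
    simp only [List.flatMap_cons, List.flatMap_nil, List.map_cons, List.map_nil,
      List.append_nil, List.mem_append, List.mem_cons, List.not_mem_nil, or_false] at hp
    rcases hp with (h | h | h) | (h | h | h) | h | h | h <;> subst h
    · simpa using g 0 0 (by omega) (by omega)
    · simpa using g 0 1 (by omega) (by omega)
    · simpa using g 0 2 (by omega) (by omega)
    · simpa using g 1 0 (by omega) (by omega)
    · simpa using g 1 1 (by omega) (by omega)
    · simpa using g 1 2 (by omega) (by omega)
    · simpa using g 2 0 (by omega) (by omega)
    · simpa using g 2 1 (by omega) (by omega)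
    · simpa using g 2 2 (by omega) (by omega)

-- ===== VERDICT (by name: the statement is the Claim_ definition above) =====
theorem get_grid_sums_spec : Claim_equal_get_grid_sums := by
  intro grid topleft _hDom hPre
  obtain ⟨hx, hy, hcells⟩ := hPre
  unfold Spec_get_grid_sums get_grid_sums get_grid_sums_alt
  have hguard : (298 < topleft.1 || 298 < topleft.2) = false := by
    simp only [Bool.or_eq_false_iff, decide_eq_false_iff_not, not_lt]
    exact ⟨hx, hy⟩
  rw [hguard]
  simp only [Bool.false_eq_true, if_false]
  set px := topleft.1 - 1 with hpx
  set py := topleft.2 - 1 with hpy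
  have hok3 : pvSqOk grid px py 3 := by
    intro y hy' x hx'
    have hxm : (x : Int) ∈ ([0, 1, 2] : List Int) := by interval_cases x <;> simp
    have hym : (y : Int) ∈ ([0, 1, 2] : List Int) := by interval_cases y <;> simp
    exact hcells _ hxm _ hym
  rw [pvInit_char grid px py hok3]
  have hv : pvSumCells grid ((PySem.List.pyRange 0 (3 : Int) 1).flatMap
      (fun y => (PySem.List.pyRange 0 (3 : Int) 1).map (fun x => (px + x, py + y))))
      = some (pvSqSum grid px py 3) := by
    rw [pvSq_char' grid px py 3 (by norm_num), show ((3 : Int).toNat) = 3 from rfl,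
        if_pos hok3]
  rw [hv]
  dsimp only
  exact pvLoop grid px py 297 3 (by omega) (by omega) hok3
    [((3 : Int), pvSqSum grid px py 3)]
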